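-- pv_equiv track=rewrite | github.com/leo-dower/arquivos_tamanho_localiza | script - localiza em 2024 arquivos com mais de 1gb e duplicados.py | check_common_substring_9_or_more
-- ===== SOURCE A (Python) =====
-- def get_substrings_of_length_9_or_more(string_name):
--     """
--     Gera todas as substrings consecutivas de length >= 9 do nome do arquivo
--     (sem pasta, mas com extensão).
--     """
--     substrings = set()
--     n = len(string_name)
--     for length in range(9, n + 1):
--         for start in range(0, n - length + 1):
--             substrings.add(string_name[start:start+length])
--     return substrings
--
-- def check_common_substring_9_or_more(target_name, all_file_names):
--     """
--     Verifica se o arquivo `target_name` contém alguma sequência de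
--     9 ou mais caracteres que apareça em outros nomes de arquivo.
--
--     Retorna:
--     - Booleano (True/False) indicando se há coincidência
--     - Lista de arquivos onde a coincidência foi encontrada
--     """
--     substrings_9_plus = get_substrings_of_length_9_or_more(target_name)
--     matching_files = []
--
--     for other_name in all_file_names:
--         # Se for o mesmo nome, pula
--         if other_name == target_name:
--             continue
--
--         # Verifica se alguma substring de 9+ caracteres está em other_name
--         if any(sub in other_name for sub in substrings_9_plus):
--             matching_files.append(other_name)
--
--     return (len(matching_files) > 0, matching_files)
-- ===== SOURCE B (Python) =====
-- def check_common_substring_9_or_more(target_name, all_file_names):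
--     # Index the target once: the set of its length-exactly-9 contiguous substrings.
--     grams = {target_name[i:i+9] for i in range(len(target_name) - 8)}
--     matching_files = [
--         other_name for other_name in all_file_names
--         if other_name != target_name
--         and any(other_name[i:i+9] in grams for i in range(len(other_name) - 8))
--     ]
--     return (len(matching_files) > 0, matching_files)
-- ===== Notes on version B (the rewrite author's own statement) =====
-- stated objective: faster
-- what changed: Instead of enumerating every length>=9 substring of the target and substring-searching each one in every other name, B builds the target's 9-gram set once and, for each other name, slides a length-9 window over it and tests exact set membership (a common substring of length>=9 exists iff a 9-gram matches).
import Mathlib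
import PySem

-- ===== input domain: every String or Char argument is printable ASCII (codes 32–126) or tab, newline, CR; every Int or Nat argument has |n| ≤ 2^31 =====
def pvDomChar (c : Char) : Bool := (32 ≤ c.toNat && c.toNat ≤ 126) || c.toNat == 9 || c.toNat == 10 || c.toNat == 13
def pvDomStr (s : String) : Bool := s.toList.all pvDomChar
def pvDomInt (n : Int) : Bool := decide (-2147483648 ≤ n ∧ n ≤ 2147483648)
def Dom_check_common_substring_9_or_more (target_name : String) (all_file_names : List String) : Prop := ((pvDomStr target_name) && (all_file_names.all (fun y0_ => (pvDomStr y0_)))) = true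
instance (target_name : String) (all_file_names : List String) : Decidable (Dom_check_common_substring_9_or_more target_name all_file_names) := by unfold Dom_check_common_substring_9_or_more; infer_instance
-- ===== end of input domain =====

-- B indexes the target's length-exactly-9 substrings once and slides a 9-window over each
-- other name, instead of enumerating all length-≥9 substrings of the target and
-- substring-searching each in every other name (objective: faster).

-- ===== PORT A =====
-- get_substrings_of_length_9_or_more: nested loops over length then start, building a set of slices
def pvSubs9 (s : List Char) : PySem.Set (List Char) :=
  (PySem.List.pyRange 9 ((s.length : Int) + 1) 1).foldl (fun subs len =>
    (PySem.List.pyRange 0 ((s.length : Int) - len + 1) 1).foldl (fun subs start =>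
      subs.add (PySem.List.slice s (some start) (some (start + len)))) subs) []

def check_common_substring_9_or_more (target_name : String) (all_file_names : List String) : Bool × List String :=
  let substrings_9_plus := pvSubs9 target_name.toList
  let matching_files := all_file_names.foldl (fun acc other_name =>
    if other_name == target_name then acc
    else if substrings_9_plus.any (fun sub => PySem.Chars.isIn sub other_name.toList) then
      acc ++ [other_name]
    else acc) []
  (decide (0 < matching_files.length), matching_files)

-- ===== PORT B =====
-- the 9-gram index of the target: set comprehension over range(len - 8)
def pvGrams9 (s : List Char) : PySem.Set (List Char) :=
  PySem.Set.ofList ((PySem.List.pyRange 0 ((s.length : Int) - 8) 1).map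
    (fun i => PySem.List.slice s (some i) (some (i + 9))))

def check_common_substring_9_or_more_alt (target_name : String) (all_file_names : List String) : Bool × List String :=
  let grams := pvGrams9 target_name.toList
  let matching_files := all_file_names.filter (fun other_name =>
    other_name != target_name &&
    (PySem.List.pyRange 0 ((other_name.toList.length : Int) - 8) 1).any (fun i =>
      grams.contains (PySem.List.slice other_name.toList (some i) (some (i + 9)))))
  (decide (0 < matching_files.length), matching_files)

-- ===== PRECONDITION & SPEC =====
def Spec_check_common_substring_9_or_more (target_name : String) (all_file_names : List String) (out : Bool × List String) : Prop := out = check_common_substring_9_or_more_alt target_name all_file_names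
instance (target_name : String) (all_file_names : List String) (out : Bool × List String) : Decidable (Spec_check_common_substring_9_or_more target_name all_file_names out) := by unfold Spec_check_common_substring_9_or_more; infer_instance

-- ===== CLAIM (what is proved, stated in full; the proofs are below) =====
def Claim_equal_check_common_substring_9_or_more : Prop := ∀ (target_name : String) (all_file_names : List String), Dom_check_common_substring_9_or_more target_name all_file_names → Spec_check_common_substring_9_or_more target_name all_file_names (check_common_substring_9_or_more target_name all_file_names)

-- ===== LEMMAS AND PROOFS =====

-- membership in a nested "for … : for … : s.add(f …)" double loop
lemma pv_mem_nested_add {β γ : Type} (l : List β) (g : β → List γ) (f : β → γ → List Char)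
    (s : PySem.Set (List Char)) (y : List Char) :
    y ∈ l.foldl (fun s b => (g b).foldl (fun s i => s.add (f b i)) s) s ↔
      y ∈ s ∨ ∃ b ∈ l, ∃ i ∈ g b, y = f b i := by
  induction l generalizing s with
  | nil => simp
  | cons b l ih =>
    simp only [List.foldl_cons, ih, PySem.Set.mem_foldl_add, List.mem_cons]
    constructor
    · rintro (((h | ⟨i, hi, rfl⟩) ) | ⟨b', hb', i, hi, rfl⟩)
      · exact Or.inl h
      · exact Or.inr ⟨b, Or.inl rfl, i, hi, rfl⟩
      · exact Or.inr ⟨b', Or.inr hb', i, hi, rfl⟩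
    · rintro (h | ⟨b', (rfl | hb'), i, hi, rfl⟩)
      · exact Or.inl (Or.inl h)
      · exact Or.inl (Or.inr ⟨i, hi, rfl⟩)
      · exact Or.inr ⟨b', hb', i, hi, rfl⟩

lemma pv_mem_subs9 (t sub : List Char) :
    sub ∈ pvSubs9 t ↔ ∃ L j : Nat, 9 ≤ L ∧ j + L ≤ t.length ∧ sub = (t.drop j).take L := by
  unfold pvSubs9
  rw [pv_mem_nested_add]
  simp only [List.not_mem_nil, false_or]
  constructor
  · rintro ⟨L, hL, st, hst, rfl⟩
    rw [PySem.List.mem_pyRange_iff_of_pos (by norm_num)] at hL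
    rw [PySem.List.mem_pyRange_iff_of_pos (by norm_num)] at hst
    refine ⟨L.toNat, st.toNat, by omega, by omega, ?_⟩
    rw [PySem.List.slice_toNat _ (by omega) (by omega)]
    congr 1
    omega
  · rintro ⟨L, j, h9, hle, rfl⟩
    refine ⟨(L : Int), ?_, (j : Int), ?_, ?_⟩
    · rw [PySem.List.mem_pyRange_iff_of_pos (by norm_num)]
      refine ⟨by exact_mod_cast h9, by omega, by simp⟩
    · rw [PySem.List.mem_pyRange_iff_of_pos (by norm_num)]
      refine ⟨by positivity, by omega, by simp⟩
    · rw [PySem.List.slice_toNat _ (by positivity) (by positivity)]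
      congr 1
      omega

lemma pv_mem_grams9 (t w : List Char) :
    w ∈ pvGrams9 t ↔ ∃ j : Nat, j + 9 ≤ t.length ∧ w = (t.drop j).take 9 := by
  unfold pvGrams9
  rw [PySem.Set.mem_ofList]
  simp only [List.mem_map]
  constructor
  · rintro ⟨i, hi, rfl⟩
    rw [PySem.List.mem_pyRange_iff_of_pos (by norm_num)] at hi
    refine ⟨i.toNat, by omega, ?_⟩
    rw [PySem.List.slice_toNat _ (by omega) (by omega)]
    congr 1
    omega
  · rintro ⟨j, hj, rfl⟩
    refine ⟨(j : Int), ?_, ?_⟩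
    · rw [PySem.List.mem_pyRange_iff_of_pos (by norm_num)]
      refine ⟨by positivity, by omega, by simp⟩
    · rw [PySem.List.slice_toNat _ (by positivity) (by positivity)]
      congr 1
      omega

-- a prefix of length ≥ 9 determines the first 9 characters
lemma pv_prefix_take_nine {sub o : List Char} (h : sub <+: o) (h9 : 9 ≤ sub.length) :
    o.take 9 = sub.take 9 := by
  obtain ⟨r, rfl⟩ := h
  rw [List.take_append]
  have : 9 - sub.length = 0 := by omega
  simp [this]

-- the per-file condition of A equals the per-file condition of B
lemma pv_cond_eq (t o : List Char) :
    (pvSubs9 t).any (fun sub => PySem.Chars.isIn sub o) =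
    (PySem.List.pyRange 0 ((o.length : Int) - 8) 1).any (fun i =>
      (pvGrams9 t).contains (PySem.List.slice o (some i) (some (i + 9)))) := by
  rw [Bool.eq_iff_iff, List.any_eq_true, List.any_eq_true]
  constructor
  · rintro ⟨sub, hsub, hin⟩
    rw [pv_mem_subs9] at hsub
    obtain ⟨L, j, h9, hle, rfl⟩ := hsub
    obtain ⟨i, hpre⟩ := (PySem.Chars.exists_prefix_drop_iff_isIn _ _).mpr hin
    have hlen : ((t.drop j).take L).length = L := by
      simp [List.length_take, List.length_drop]; omega
    have hlen9 : 9 ≤ ((t.drop j).take L).length := by omega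
    have hwin : (o.drop i).take 9 = ((t.drop j).take L).take 9 :=
      pv_prefix_take_nine hpre hlen9
    have hio : i + 9 ≤ o.length := by
      have := hpre.length_le
      simp [List.length_drop] at this
      omega
    refine ⟨(i : Int), ?_, ?_⟩
    · rw [PySem.List.mem_pyRange_iff_of_pos (by norm_num)]
      refine ⟨by positivity, by omega, by simp⟩
    · rw [PySem.Set.contains_iff, PySem.List.slice_toNat _ (by positivity) (by positivity),
        pv_mem_grams9]
      refine ⟨j, by omega, ?_⟩
      have : ((i : Int) + 9).toNat - (i : Int).toNat = 9 := by omega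
      rw [this]
      simp only [Int.toNat_natCast]
      rw [hwin, List.take_take]
      congr 1
      omega
  · rintro ⟨i, hi, hcon⟩
    rw [PySem.List.mem_pyRange_iff_of_pos (by norm_num)] at hi
    rw [PySem.Set.contains_iff, PySem.List.slice_toNat _ (by omega) (by omega),
      pv_mem_grams9] at hcon
    obtain ⟨j, hj, hw⟩ := hcon
    have h9 : (i + 9).toNat - i.toNat = 9 := by omega
    rw [h9] at hw
    refine ⟨(o.drop i.toNat).take 9, ?_, ?_⟩
    · rw [pv_mem_subs9]
      exact ⟨9, j, le_refl 9, hj, hw⟩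
    · rw [← PySem.Chars.exists_prefix_drop_iff_isIn]
      exact ⟨i.toNat, List.take_prefix _ _⟩

-- A's accumulate-loop is B's filter
lemma pv_list_eq (t : String) (fs : List String) :
    fs.foldl (fun acc other =>
      if other == t then acc
      else if (pvSubs9 t.toList).any (fun sub => PySem.Chars.isIn sub other.toList) then
        acc ++ [other]
      else acc) [] =
    fs.filter (fun other =>
      other != t &&
      (PySem.List.pyRange 0 ((other.toList.length : Int) - 8) 1).any (fun i =>
        (pvGrams9 t.toList).contains (PySem.List.slice other.toList (some i) (some (i + 9))))) := by
  have hfun : ∀ (acc : List String) (other : String),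
      (if other == t then acc
       else if (pvSubs9 t.toList).any (fun sub => PySem.Chars.isIn sub other.toList) then
         acc ++ [other]
       else acc) =
      (if (other != t &&
          (PySem.List.pyRange 0 ((other.toList.length : Int) - 8) 1).any (fun i =>
            (pvGrams9 t.toList).contains
              (PySem.List.slice other.toList (some i) (some (i + 9))))) = true then
        acc ++ [id other]
       else acc) := by
    intro acc other
    rw [← pv_cond_eq t.toList other.toList]
    by_cases h : other = t
    · simp [h]
    · cases hA : (pvSubs9 t.toList).any (fun sub => PySem.Chars.isIn sub other.toList) <;>
        simp [h]
  calc fs.foldl (fun acc other =>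
        if other == t then acc
        else if (pvSubs9 t.toList).any (fun sub => PySem.Chars.isIn sub other.toList) then
          acc ++ [other]
        else acc) []
      = fs.foldl (fun acc other =>
          if (other != t &&
              (PySem.List.pyRange 0 ((other.toList.length : Int) - 8) 1).any (fun i =>
                (pvGrams9 t.toList).contains
                  (PySem.List.slice other.toList (some i) (some (i + 9))))) = true then
            acc ++ [id other]
          else acc) [] := by
        exact PySem.List.foldl_congr_mem fs _ _ [] (fun acc b _ => hfun acc b)
    _ = _ := by
        rw [PySem.List.foldl_append_if]
        simp [List.map_id]

-- ===== VERDICT (by name: the statement is the Claim_ definition above) =====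
theorem check_common_substring_9_or_more_spec : Claim_equal_check_common_substring_9_or_more := by
  intro target_name all_file_names _
  unfold Spec_check_common_substring_9_or_more
  unfold check_common_substring_9_or_more check_common_substring_9_or_more_alt
  simp only
  rw [pv_list_eq]
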